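-- pv_equiv track=rewrite | github.com/jsivaramateja1-del/SECTION---4 | Lec14.py | movedups
-- ===== SOURCE A (Python) =====
-- def movedups(str):
--     d1 = {}
--     unique = ""
--     duplicates = ""
--     for i in str:
--         if i not in d1.keys():
--             d1[i] = 1
--             unique += (i)
--         else:
--             d1[i] += 1
--             duplicates += (i)
--     return unique+'_'+duplicates
-- ===== SOURCE B (Python) =====
-- def movedups(str):
--     # Two staged passes: dedup the string (keys in first-occurrence order),
--     # then delete each distinct char's first occurrence from a copy of the
--     # string; what remains, in order, is exactly the duplicate occurrences.
--     unique = dict.fromkeys(str)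
--     rest = list(str)
--     for c in unique:
--         rest.remove(c)
--     return ''.join(unique) + '_' + ''.join(rest)
-- ===== Notes on version B (the rewrite author's own statement) =====
-- stated objective: alternative
-- what changed: Replaces A's single classifying pass (dict of counts, two growing strings) with two staged passes: dedup the string via dict.fromkeys for the unique part, then delete each distinct char's first occurrence from a copy of the string with list.remove, so the remainder in order is exactly the duplicates.
import Mathlib
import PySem

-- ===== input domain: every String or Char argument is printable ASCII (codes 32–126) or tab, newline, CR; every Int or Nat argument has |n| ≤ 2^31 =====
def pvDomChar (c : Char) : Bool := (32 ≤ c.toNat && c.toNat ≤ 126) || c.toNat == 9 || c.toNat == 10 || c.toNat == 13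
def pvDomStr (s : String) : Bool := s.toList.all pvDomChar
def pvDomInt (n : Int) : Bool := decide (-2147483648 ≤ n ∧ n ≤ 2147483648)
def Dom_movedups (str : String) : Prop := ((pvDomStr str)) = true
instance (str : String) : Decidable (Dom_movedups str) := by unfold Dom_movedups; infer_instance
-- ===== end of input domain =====

-- B replaces A's single classifying pass with two staged passes: dedup the string, then
-- delete each distinct char's first occurrence from a copy; the remainder is the duplicates.

-- ===== PORT A =====
-- loop body of A: dict of counts, append char to unique or duplicates
def stepA (st : PySem.Dict Char Int × List Char × List Char) (i : Char) :
    PySem.Dict Char Int × List Char × List Char :=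
  if st.1.contains i = false then
    (st.1.insert i 1, st.2.1 ++ [i], st.2.2)
  else
    (st.1.modify i 0 (· + 1), st.2.1, st.2.2 ++ [i])

def movedups (str : String) : String :=
  String.ofList ((str.toList.foldl stepA (PySem.Dict.empty, [], [])).2.1
    ++ '_' :: (str.toList.foldl stepA (PySem.Dict.empty, [], [])).2.2)

-- ===== PORT B =====
-- rest.remove(c): PySem.List.remove? is Python's list.remove (none = ValueError; here each
-- distinct char of str is present in rest, so the none branch is unreachable — proved via stepRem_eq_erase)
def stepRem (st : List Char) (c : Char) : List Char :=
  match PySem.List.remove? st c with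
  | some r => r
  | none => st

def movedups_alt (str : String) : String :=
  let unique := PySem.List.dedup str.toList      -- dict.fromkeys(str)
  let rest := unique.foldl stepRem str.toList    -- for c in unique: rest.remove(c)
  String.ofList (unique ++ '_' :: rest)

-- ===== PRECONDITION & SPEC =====
def Spec_movedups (str : String) (out : String) : Prop := out = movedups_alt str
instance (str : String) (out : String) : Decidable (Spec_movedups str out) := by unfold Spec_movedups; infer_instance

-- ===== CLAIM (what is proved, stated in full; the proofs are below) =====
def Claim_equal_movedups : Prop := ∀ (str : String), Dom_movedups str → Spec_movedups str (movedups str)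

-- ===== LEMMAS AND PROOFS =====

lemma stepRem_eq_erase (st : List Char) (c : Char) : stepRem st c = st.erase c := by
  unfold stepRem
  by_cases h : c ∈ st
  · rw [PySem.List.remove?_eq_some_erase st c h]
  · rw [(PySem.List.remove?_eq_none_iff st c).2 h, List.erase_of_not_mem h]

lemma foldl_erase_subset (ks : List Char) : ∀ xs : List Char, ks.foldl List.erase xs ⊆ xs := by
  induction ks with
  | nil => intro xs; simp
  | cons k ks ih =>
    intro xs
    exact fun x hx => List.erase_subset (ih (xs.erase k) hx)

-- erasing distinct keys that all live in xs does not touch an appended tail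
lemma foldl_erase_append (ks : List Char) : ∀ (xs ys : List Char), ks.Nodup →
    (∀ k ∈ ks, k ∈ xs) → ks.foldl List.erase (xs ++ ys) = ks.foldl List.erase xs ++ ys := by
  induction ks with
  | nil => intro xs ys _ _; rfl
  | cons k ks ih =>
    intro xs ys hnd hmem
    simp only [List.foldl_cons]
    rw [List.erase_append_left ys (hmem k (by simp))]
    apply ih
    · exact hnd.of_cons
    · intro k' hk'
      have hne : k' ≠ k := fun h => (List.nodup_cons.1 hnd).1 (h ▸ hk')
      exact (List.mem_erase_of_ne hne).2 (hmem k' (by simp [hk']))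

lemma dedup_append_singleton (cs : List Char) (c : Char) :
    PySem.List.dedup (cs ++ [c])
      = if c ∈ cs then PySem.List.dedup cs else PySem.List.dedup cs ++ [c] := by
  simp only [PySem.List.dedup_eq_ofList, PySem.Set.ofList_eq_foldl, List.foldl_append,
    List.foldl_cons, List.foldl_nil]
  rw [← PySem.Set.ofList_eq_foldl]
  unfold PySem.Set.add
  by_cases h : c ∈ cs
  · simp [h]
  · have : ¬ c ∈ PySem.Set.ofList cs := fun hc => h ((PySem.Set.mem_ofList cs c).1 hc)
    simp only [h, if_false]
    simp [PySem.Set.contains, this]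

-- main invariant: A's (unique, duplicates) pair is (dedup cs, erase-fold), and A's dict
-- contains exactly the seen chars
lemma main_inv (cs : List Char) :
    (cs.foldl stepA (PySem.Dict.empty, [], [])).2.1 = PySem.List.dedup cs
    ∧ (cs.foldl stepA (PySem.Dict.empty, [], [])).2.2
        = (PySem.List.dedup cs).foldl List.erase cs
    ∧ ∀ x, (cs.foldl stepA (PySem.Dict.empty, [], [])).1.contains x = decide (x ∈ cs) := by
  induction cs using List.reverseRecOn with
  | nil => refine ⟨rfl, rfl, ?_⟩; intro x; simp
  | append_singleton cs c ih =>
    obtain ⟨ihu, ihd, ihc⟩ := ih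
    rw [List.foldl_append, List.foldl_cons, List.foldl_nil]
    have hdc := ihc c
    have hsub : ∀ k ∈ PySem.List.dedup cs, k ∈ cs := fun k hk => (PySem.List.mem_dedup cs k).1 hk
    have hnd : (PySem.List.dedup cs).Nodup := PySem.List.nodup_dedup cs
    by_cases hc : c ∈ cs
    · -- duplicate occurrence
      have hA : stepA (cs.foldl stepA (PySem.Dict.empty, [], [])) c
          = ((cs.foldl stepA (PySem.Dict.empty, [], [])).1.modify c 0 (· + 1),
             (cs.foldl stepA (PySem.Dict.empty, [], [])).2.1,
             (cs.foldl stepA (PySem.Dict.empty, [], [])).2.2 ++ [c]) := by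
        simp [stepA, hdc, hc]
      rw [hA, dedup_append_singleton, if_pos hc]
      refine ⟨ihu, ?_, ?_⟩
      · rw [ihd, foldl_erase_append _ _ _ hnd hsub]
      · intro x
        simp only [PySem.Dict.contains_modify, ihc x]
        by_cases hxc : x = c <;> simp [hxc, hc]
    · -- first occurrence
      have hA : stepA (cs.foldl stepA (PySem.Dict.empty, [], [])) c
          = ((cs.foldl stepA (PySem.Dict.empty, [], [])).1.insert c 1,
             (cs.foldl stepA (PySem.Dict.empty, [], [])).2.1 ++ [c],
             (cs.foldl stepA (PySem.Dict.empty, [], [])).2.2) := by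
        simp [stepA, hdc, hc]
      rw [hA, dedup_append_singleton, if_neg hc]
      refine ⟨by rw [ihu], ?_, ?_⟩
      · rw [ihd, List.foldl_append, List.foldl_cons, List.foldl_nil,
            foldl_erase_append _ _ _ hnd hsub]
        have hcnot : c ∉ (PySem.List.dedup cs).foldl List.erase cs :=
          fun h => hc (foldl_erase_subset _ cs h)
        rw [List.erase_append_right _ hcnot, List.erase_cons_head]
        simp
      · intro x
        simp only [PySem.Dict.contains_insert, ihc x]
        by_cases hxc : x = c <;> simp [hxc]

lemma foldl_stepRem (ks xs : List Char) : ks.foldl stepRem xs = ks.foldl List.erase xs := by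
  induction ks generalizing xs with
  | nil => rfl
  | cons k ks ih => simp [List.foldl_cons, stepRem_eq_erase, ih]

-- ===== VERDICT (by name: the statement is the Claim_ definition above) =====
theorem movedups_spec : Claim_equal_movedups := by
  intro str _
  unfold Spec_movedups movedups movedups_alt
  simp only []
  obtain ⟨hu, hd, -⟩ := main_inv str.toList
  rw [hu, hd, foldl_stepRem]
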